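-- pv_equiv track=rewrite | github.com/aida-ugent/CLIMB | src/tree_utils.py | classify_within_branch_repetition
-- ===== SOURCE A (Python) =====
-- def classify_within_branch_repetition(trimmed):
--     """
--     Given a trimmed branch (list of (node.id, label) tuples) with no trailing empty labels,
--     classify its repetition pattern for the meaningful labels.
--
--     Returns:
--       - "intervening" if there is any repeated label with a gap.
--       - "consecutive" if there is at least one repeated label and all repetitions are adjacent.
--       - "none" if there are no repeated labels.
--     """
--     # Extract only meaningful labels.
--     labels = [lbl for (_, lbl) in trimmed if lbl]
--
--     # Build a mapping from each label to the list of indices where it appears.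
--     index_map = {}
--     for i, lbl in enumerate(labels):
--         index_map.setdefault(lbl, []).append(i)
--
--     has_repetition = False
--     for lbl, indices in index_map.items():
--         if len(indices) > 1:
--             has_repetition = True  # There is repetition for this label.
--             # Check if there is any gap between successive occurrences.
--             for j in range(1, len(indices)):
--                 if indices[j] - indices[j-1] > 1:
--                     return "intervening"
--     return "consecutive" if has_repetition else "none"
-- ===== SOURCE B (Python) =====
-- def classify_within_branch_repetition(trimmed):
--     # Single pass: track the most recent index of each meaningful label;
--     # a gap (> 1) to the previous occurrence means "intervening".
--     last_index = {}
--     has_repetition = False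
--     i = 0
--     for _, lbl in trimmed:
--         if lbl:
--             prev = last_index.get(lbl)
--             if prev is not None:
--                 has_repetition = True
--                 if i - prev > 1:
--                     return "intervening"
--             last_index[lbl] = i
--             i += 1
--     return "consecutive" if has_repetition else "none"
-- ===== Notes on version B (the rewrite author's own statement) =====
-- stated objective: alternative
-- what changed: A builds a dict of full per-label index lists and then runs a second grouped pass with an inner gap-scan over each list; B is a single pass over the branch that keeps only each label's most recent index and decides the gap/repetition online, with O(1) memory per label and no second pass.
import Mathlib
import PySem

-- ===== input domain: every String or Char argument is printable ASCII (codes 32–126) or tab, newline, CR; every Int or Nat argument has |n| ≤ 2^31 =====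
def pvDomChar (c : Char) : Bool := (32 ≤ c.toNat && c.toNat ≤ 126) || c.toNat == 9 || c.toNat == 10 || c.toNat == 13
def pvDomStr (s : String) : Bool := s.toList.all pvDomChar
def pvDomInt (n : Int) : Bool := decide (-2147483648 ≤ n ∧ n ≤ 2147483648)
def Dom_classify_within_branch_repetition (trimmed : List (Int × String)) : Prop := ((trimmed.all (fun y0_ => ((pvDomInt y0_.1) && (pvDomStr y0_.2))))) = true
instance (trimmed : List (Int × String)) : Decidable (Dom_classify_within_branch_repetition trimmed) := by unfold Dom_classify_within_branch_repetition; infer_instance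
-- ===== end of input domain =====

-- B replaces A's per-label index lists and second grouped pass by one pass over the
-- branch that only remembers each label's most recent index (objective: alternative,
-- O(1) per-label memory instead of a full occurrence list).

-- ===== PORT A =====
-- inner loop 'for j in range(1, len(indices)): if indices[j] - indices[j-1] > 1: return "intervening"';
-- j and j-1 are always in range there, so pyGetD with default 0 is exact
def pvGapA (indices : List Int) : Bool :=
  (PySem.List.pyRange 1 (indices.length : Int) 1).any
    (fun j => decide (1 < PySem.List.pyGetD indices j 0 - PySem.List.pyGetD indices (j - 1) 0))

-- second loop of A: walk over index_map.items() carrying has_repetition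
def pvOuterA : List (String × List Int) → Bool → String
  | [], rep => if rep then "consecutive" else "none"
  | (_, indices) :: rest, rep =>
    if 1 < indices.length then
      if pvGapA indices then "intervening" else pvOuterA rest true
    else pvOuterA rest rep

def classify_within_branch_repetition (trimmed : List (Int × String)) : String :=
  let labels := (trimmed.map (fun p => p.2)).filter (fun l => !(l == ""))
  -- index_map.setdefault(lbl, []).append(i)  ==  index_map[lbl] = index_map.get(lbl, []) + [i]
  let index_map : PySem.Dict String (List Int) :=
    (PySem.List.enumerate labels).foldl
      (fun d p => d.modify p.2 ([] : List Int) (fun xs => xs ++ [p.1])) PySem.Dict.empty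
  pvOuterA index_map.items false

-- ===== PORT B =====
-- single pass over trimmed: i counts meaningful labels, last = dict label -> most recent index
def pvLoopB : List (Int × String) → Int → PySem.Dict String Int → Bool → String
  | [], _, _, rep => if rep then "consecutive" else "none"
  | (_, lbl) :: rest, i, last, rep =>
    if !(lbl == "") then
      match last.get? lbl with
      | some prev =>
        if 1 < i - prev then "intervening"
        else pvLoopB rest (i + 1) (last.insert lbl i) true
      | none => pvLoopB rest (i + 1) (last.insert lbl i) rep
    else pvLoopB rest i last rep

def classify_within_branch_repetition_alt (trimmed : List (Int × String)) : String :=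
  pvLoopB trimmed 0 PySem.Dict.empty false

-- ===== PRECONDITION & SPEC =====
def Spec_classify_within_branch_repetition (trimmed : List (Int × String)) (out : String) : Prop := out = classify_within_branch_repetition_alt trimmed
instance (trimmed : List (Int × String)) (out : String) : Decidable (Spec_classify_within_branch_repetition trimmed out) := by unfold Spec_classify_within_branch_repetition; infer_instance

-- ===== CLAIM (what is proved, stated in full; the proofs are below) =====
def Claim_equal_classify_within_branch_repetition : Prop := ∀ (trimmed : List (Int × String)), Dom_classify_within_branch_repetition trimmed → Spec_classify_within_branch_repetition trimmed (classify_within_branch_repetition trimmed)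

-- ===== LEMMAS AND PROOFS =====

-- occurrence indices of label l in labels, numbered from s
def pvOccE (s : Int) (labels : List String) (l : String) : List Int :=
  ((PySem.List.enumerate labels s).filter (fun p => p.2 == l)).map (fun p => p.1)

-- p is the last occurrence of l strictly before position k
def pvIsLastBefore (labels : List String) (l : String) (k : Nat) (p : Int) : Prop :=
  p ∈ pvOccE 0 labels l ∧ p < (k : Int) ∧ ∀ j ∈ pvOccE 0 labels l, j < (k : Int) → j ≤ p

-- Bool: some position k repeats a label whose previous occurrence is more than 1 away
def pvGapB (labels : List String) : Bool :=
  (List.range labels.length).any (fun k =>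
    (pvOccE 0 labels (labels.getD k "")).any (fun p =>
      decide (p < (k : Int) ∧ 1 < (k : Int) - p) &&
      (pvOccE 0 labels (labels.getD k "")).all (fun j => decide (j < (k : Int) → j ≤ p))))

def pvGapP (labels : List String) : Prop :=
  ∃ k, ∃ _ : k < labels.length, ∃ p, pvIsLastBefore labels labels[k] k p ∧ 1 < (k : Int) - p

-- the common reference result
def pvRes (labels : List String) : String :=
  cond (pvGapB labels) "intervening" (cond (decide labels.Nodup) "none" "consecutive")

-- dict state of B after processing prefix P
def pvDA (P : List String) : PySem.Dict String Int :=
  (PySem.List.enumerate P).foldl (fun d p => d.insert p.2 p.1) PySem.Dict.empty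

-- B without the empty-label skipping, over the filtered labels
def pvLoopB' : List String → Int → PySem.Dict String Int → Bool → String
  | [], _, _, rep => if rep then "consecutive" else "none"
  | lbl :: rest, i, last, rep =>
    match last.get? lbl with
    | some prev =>
      if 1 < i - prev then "intervening"
      else pvLoopB' rest (i + 1) (last.insert lbl i) true
    | none => pvLoopB' rest (i + 1) (last.insert lbl i) rep

lemma pvOccE_mem {s : Int} {labels : List String} {l : String} {j : Int} :
    j ∈ pvOccE s labels l ↔ ∃ k : Nat, ∃ _ : k < labels.length, j = s + k ∧ labels[k] = l := by
  simp [pvOccE, List.mem_filter, PySem.List.mem_enumerate_iff]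

lemma pvOccE_sorted (s : Int) (labels : List String) (l : String) :
    (pvOccE s labels l).Pairwise (· < ·) := by
  apply List.Pairwise.map
  case _ => exact fun p q h => h
  exact (PySem.List.pairwise_lt_enumerate labels s).filter _

lemma pvOccE_append (s : Int) (P Q : List String) (l : String) :
    pvOccE s (P ++ Q) l = pvOccE s P l ++ pvOccE (s + P.length) Q l := by
  simp [pvOccE, PySem.List.enumerate_append]

lemma pvOccE_snoc (s : Int) (P : List String) (x l : String) :
    pvOccE s (P ++ [x]) l = pvOccE s P l ++ (if x == l then [s + (P.length : Int)] else []) := by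
  rw [pvOccE_append]
  congr 1
  simp [pvOccE, PySem.List.enumerate_cons, List.filter_cons]
  split <;> simp_all

lemma pvOccE_length (labels : List String) (l : String) :
    (pvOccE 0 labels l).length = labels.count l := by
  rw [pvOccE, List.length_map, ← List.countP_eq_length_filter,
    show (fun p : Int × String => p.2 == l) = ((· == l) ∘ Prod.snd) from rfl,
    ← List.countP_map, PySem.List.map_snd_enumerate, List.count]

lemma pvOccE_nil_iff (labels : List String) (l : String) :
    pvOccE 0 labels l = [] ↔ l ∉ labels := by
  rw [← List.length_eq_zero_iff, pvOccE_length, List.count_eq_zero]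

-- max of a strictly sorted list is its last element
lemma sorted_getLast?_max {occ : List Int} (hs : occ.Pairwise (· < ·)) {p : Int}
    (h : occ.getLast? = some p) : p ∈ occ ∧ ∀ j ∈ occ, j ≤ p := by
  obtain ⟨ys, rfl⟩ := List.getLast?_eq_some_iff.mp h
  rw [List.pairwise_append] at hs
  refine ⟨by simp, ?_⟩
  intro j hj
  rcases List.mem_append.mp hj with h1 | h1
  · exact le_of_lt (hs.2.2 j h1 p (by simp))
  · simp at h1; omega

lemma pvGapA_char (occ : List Int) :
    pvGapA occ = true ↔ ∃ t : Nat, ∃ _ : t + 1 < occ.length, 1 < occ[t + 1] - occ[t] := by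
  rw [pvGapA, List.any_eq_true]
  constructor
  · rintro ⟨j, hj, hd⟩
    rw [PySem.List.mem_pyRange_one] at hj
    rw [decide_eq_true_iff] at hd
    refine ⟨j.toNat - 1, by omega, ?_⟩
    rw [PySem.List.pyGetD_eq_getElem occ 0 (by omega) hj.2,
        PySem.List.pyGetD_eq_getElem occ 0 (by omega) (by omega)] at hd
    simpa [show (j - 1).toNat = j.toNat - 1 from by omega,
           show j.toNat - 1 + 1 = j.toNat from by omega] using hd
  · rintro ⟨t, ht, hd⟩
    refine ⟨(t + 1 : Nat), ?_, ?_⟩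
    · rw [PySem.List.mem_pyRange_one]; constructor <;> [omega; exact_mod_cast ht]
    · rw [decide_eq_true_iff,
        PySem.List.pyGetD_eq_getElem occ 0 (by omega) (by exact_mod_cast ht),
        PySem.List.pyGetD_eq_getElem occ 0 (by omega) (by push_cast; omega)]
      simpa [show (((t+1 : Nat) : Int) - 1).toNat = t from by omega] using hd

lemma pvGapA_short {occ : List Int} (h : occ.length ≤ 1) : pvGapA occ = false := by
  rw [pvGapA, PySem.List.pyRange_one_eq_nil (by exact_mod_cast h)]
  rfl

lemma pvGapB_iff (labels : List String) : pvGapB labels = true ↔ pvGapP labels := by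
  rw [pvGapB, List.any_eq_true]
  constructor
  · rintro ⟨k, hk, hx⟩
    rw [List.mem_range] at hk
    rw [List.getD_eq_getElem labels "" hk] at hx
    rw [List.any_eq_true] at hx
    obtain ⟨p, hp, hc⟩ := hx
    rw [Bool.and_eq_true, decide_eq_true_iff, List.all_eq_true] at hc
    exact ⟨k, hk, p, ⟨hp, hc.1.1, fun j hj hlt => by have := hc.2 j hj; simp at this; omega⟩, hc.1.2⟩
  · rintro ⟨k, hk, p, ⟨hpm, hpk, hmax⟩, hg⟩
    refine ⟨k, List.mem_range.mpr hk, ?_⟩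
    rw [List.getD_eq_getElem labels "" hk, List.any_eq_true]
    exact ⟨p, hpm, by
      rw [Bool.and_eq_true, decide_eq_true_iff, List.all_eq_true]
      exact ⟨⟨hpk, hg⟩, fun j hj => by have := hmax j hj; simp; omega⟩⟩

-- the central combinatorial fact: A's per-label adjacent-gap test matches B's last-index events
lemma gap_main (labels : List String) :
    (∃ l ∈ labels, pvGapA (pvOccE 0 labels l) = true) ↔ pvGapP labels := by
  constructor
  · rintro ⟨l, hl, hgap⟩
    rw [pvGapA_char] at hgap
    obtain ⟨t, ht, hd⟩ := hgap
    have hs := pvOccE_sorted 0 labels l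
    have hb : (pvOccE 0 labels l)[t+1] ∈ pvOccE 0 labels l := List.getElem_mem _
    have ha : (pvOccE 0 labels l)[t]'(by omega) ∈ pvOccE 0 labels l := List.getElem_mem _
    obtain ⟨k, hk, hbk, hlk⟩ := pvOccE_mem.mp hb
    rw [zero_add] at hbk
    refine ⟨k, hk, (pvOccE 0 labels l)[t]'(by omega), ⟨?_, ?_, ?_⟩, ?_⟩
    · rw [hlk]; exact ha
    · rw [← hbk]; exact List.pairwise_iff_getElem.mp hs t (t+1) (by omega) ht (by omega)
    · intro j hj hjk
      rw [hlk] at hj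
      obtain ⟨s, hsl, rfl⟩ := List.mem_iff_getElem.mp hj
      rcases Nat.lt_or_ge s (t+1) with hc | hc
      · rcases Nat.eq_or_lt_of_le (Nat.le_of_lt_succ hc) with rfl | hc'
        · exact le_refl _
        · exact le_of_lt (List.pairwise_iff_getElem.mp hs s t (by omega) (by omega) hc')
      · exfalso
        have := List.pairwise_iff_getElem.mp hs (t+1) s ht hsl
        rcases Nat.eq_or_lt_of_le hc with rfl | hc'
        · omega
        · have := this hc'; omega
    · omega
  · rintro ⟨k, hk, p, ⟨hpmem, hpk, hmax⟩, hgap⟩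
    refine ⟨labels[k], List.getElem_mem hk, ?_⟩
    rw [pvGapA_char]
    have hs := pvOccE_sorted 0 labels labels[k]
    have hkm : (k : Int) ∈ pvOccE 0 labels labels[k] := pvOccE_mem.mpr ⟨k, hk, by simp, rfl⟩
    obtain ⟨t0, ht0, hkt0⟩ := List.mem_iff_getElem.mp hkm
    obtain ⟨s0, hs0, hps0⟩ := List.mem_iff_getElem.mp hpmem
    have hst : s0 < t0 := by
      by_contra hcon
      rcases Nat.eq_or_lt_of_le (Nat.le_of_not_lt hcon) with rfl | hc
      · rw [hps0] at hkt0; omega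
      · have := List.pairwise_iff_getElem.mp hs t0 s0 ht0 hs0 hc; omega
    refine ⟨t0 - 1, by omega, ?_⟩
    have hteq : t0 - 1 + 1 = t0 := by omega
    have hamem : (pvOccE 0 labels labels[k])[t0-1]'(by omega) ∈ pvOccE 0 labels labels[k] :=
      List.getElem_mem _
    have hak : (pvOccE 0 labels labels[k])[t0-1]'(by omega) < (k : Int) := by
      have := List.pairwise_iff_getElem.mp hs (t0-1) t0 (by omega) ht0 (by omega)
      omega
    have hap : (pvOccE 0 labels labels[k])[t0-1]'(by omega) ≤ p := hmax _ hamem hak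
    simp only [hteq, hkt0]
    omega

lemma pvOuterA_char (lst : List (String × List Int)) (rep : Bool) :
    pvOuterA lst rep =
      cond (lst.any fun q => pvGapA q.2) "intervening"
        (cond (rep || lst.any fun q => decide (1 < q.2.length)) "consecutive" "none") := by
  induction lst generalizing rep with
  | nil => cases rep <;> simp [pvOuterA]
  | cons q rest ih =>
    obtain ⟨l, ind⟩ := q
    by_cases hlen : 1 < ind.length
    · by_cases hg : pvGapA ind
      · simp [pvOuterA, hlen, hg]
      · rw [Bool.not_eq_true] at hg
        rw [show pvOuterA ((l, ind) :: rest) rep = pvOuterA rest true by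
            simp [pvOuterA, hlen, hg], ih]
        simp [hg, hlen]
    · have hg : pvGapA ind = false := pvGapA_short (by omega)
      rw [show pvOuterA ((l, ind) :: rest) rep = pvOuterA rest rep by simp [pvOuterA, hlen], ih]
      simp [hg, hlen]

lemma rep_iff_not_nodup (labels : List String) :
    ((PySem.Set.ofList labels).any fun k => decide (1 < (pvOccE 0 labels k).length))
      = !decide labels.Nodup := by
  rw [Bool.eq_iff_iff, List.any_eq_true]
  simp only [Bool.not_eq_eq_eq_not, Bool.not_true, decide_eq_false_iff_not,
    decide_eq_true_iff, PySem.Set.mem_ofList, pvOccE_length]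
  rw [List.nodup_iff_count_le_one]
  constructor
  · rintro ⟨l, _, hc⟩ hno
    exact absurd (hno l) (by omega)
  · intro h
    push Not at h
    obtain ⟨l, hc⟩ := h
    exact ⟨l, List.count_pos_iff.mp (by omega), by omega⟩

lemma A_eq_pvRes (trimmed : List (Int × String)) :
    classify_within_branch_repetition trimmed =
      pvRes ((trimmed.map (fun p => p.2)).filter (fun l => !(l == ""))) := by
  set labels := (trimmed.map (fun p => p.2)).filter (fun l => !(l == "")) with hl
  have hgetD : ∀ c, ((PySem.List.enumerate labels).foldl
      (fun d p => d.modify p.2 ([] : List Int) (fun xs => xs ++ [p.1])) PySem.Dict.empty).getD c []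
      = pvOccE 0 labels c := by
    intro c
    have hmap : ((PySem.List.enumerate labels).map Prod.swap).foldl
        (fun d p => d.modify p.1 ([] : List Int) (fun xs => xs ++ [p.2])) PySem.Dict.empty
        = (PySem.List.enumerate labels).foldl
          (fun d p => d.modify p.2 ([] : List Int) (fun xs => xs ++ [p.1])) PySem.Dict.empty := by
      rw [List.foldl_map]
      rfl
    rw [← hmap, PySem.Dict.getD_foldl_modify_append, List.filter_map, List.map_map]
    simp [pvOccE, Function.comp_def, Prod.fst_swap, Prod.snd_swap, PySem.Dict.getD_empty]
  have hkeys : ((PySem.List.enumerate labels).foldl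
      (fun d p => d.modify p.2 ([] : List Int) (fun xs => xs ++ [p.1])) PySem.Dict.empty).keys
      = PySem.Set.ofList labels := by
    rw [PySem.Dict.keys_foldl_modify_key (PySem.List.enumerate labels) (fun p => p.2)
      ([] : List Int) (fun d p => fun xs => xs ++ [p.1]) PySem.Dict.empty,
      PySem.List.map_snd_enumerate, PySem.Dict.keys_empty, PySem.Set.update_nil_left]
  rw [show classify_within_branch_repetition trimmed
      = pvOuterA ((PySem.List.enumerate labels).foldl
          (fun d p => d.modify p.2 ([] : List Int) (fun xs => xs ++ [p.1]))
          PySem.Dict.empty).items false from rfl]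
  rw [PySem.Dict.items_eq_map_keys _ (by rw [hkeys]; exact PySem.Set.nodup_ofList labels)
    ([] : List Int), hkeys, pvOuterA_char, List.any_map, List.any_map]
  simp only [Function.comp_def, hgetD, Bool.false_or]
  have h1 : ((PySem.Set.ofList labels).any fun k => pvGapA (pvOccE 0 labels k)) = pvGapB labels := by
    rw [Bool.eq_iff_iff, List.any_eq_true, pvGapB_iff]
    rw [← gap_main]
    constructor
    · rintro ⟨l, hm, h⟩; exact ⟨l, (PySem.Set.mem_ofList _ _).mp hm, h⟩
    · rintro ⟨l, hm, h⟩; exact ⟨l, (PySem.Set.mem_ofList _ _).mpr hm, h⟩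
  rw [h1, rep_iff_not_nodup, pvRes]
  cases decide labels.Nodup <;> rfl

lemma pvLoopB_filter (trimmed : List (Int × String)) : ∀ (i : Int) (d : PySem.Dict String Int) (rep : Bool),
    pvLoopB trimmed i d rep = pvLoopB' ((trimmed.map (fun p => p.2)).filter (fun l => !(l == ""))) i d rep := by
  induction trimmed with
  | nil => intro i d rep; rfl
  | cons q rest ih =>
    intro i d rep
    obtain ⟨m, lbl⟩ := q
    by_cases h : lbl = ""
    · subst h
      simpa [pvLoopB] using ih i d rep
    · have hb : (!(lbl == "")) = true := by simp [h]
      simp only [List.map_cons, List.filter_cons, hb, if_true]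
      cases hq : d.get? lbl with
      | some prev => simp [pvLoopB, pvLoopB', hb, hq, ih]
      | none => simp [pvLoopB, pvLoopB', hb, hq, ih]

lemma pvDA_snoc (P : List String) (x : String) :
    pvDA (P ++ [x]) = (pvDA P).insert x (P.length : Int) := by
  rw [pvDA, PySem.List.enumerate_append, List.foldl_append]
  simp [pvDA, PySem.List.enumerate_cons, PySem.List.enumerate_nil]

lemma pvDA_get? (P : List String) (l : String) :
    (pvDA P).get? l = (pvOccE 0 P l).getLast? := by
  induction P using List.reverseRecOn with
  | nil => simp [pvDA, pvOccE, PySem.List.enumerate_nil, PySem.Dict.get?_empty]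
  | append_singleton P x ih =>
    rw [pvDA_snoc, PySem.Dict.get?_insert, pvOccE_snoc]
    by_cases h : l = x
    · subst h
      simp
    · have hbeq : (x == l) = false := by simp [Ne.symm h]
      rw [hbeq]
      simp [h, ih]

lemma pvLoopB'_main : ∀ (rest : List String), ∀ P : List String,
    (∀ k, ∀ _ : k < P.length, ∀ p, pvIsLastBefore (P ++ rest) ((P ++ rest).getD k "") k p → ¬ 1 < (k : Int) - p) →
    pvLoopB' rest (P.length : Int) (pvDA P) (!decide P.Nodup) = pvRes (P ++ rest) := by
  intro rest
  induction rest with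
  | nil =>
    intro P hprev
    have hng : pvGapB P = false := by
      by_contra hc
      rw [Bool.not_eq_false, pvGapB_iff] at hc
      obtain ⟨k, hk, p, hlb, hgap⟩ := hc
      refine hprev k (by simpa using hk) p ?_ hgap
      rw [List.append_nil, List.getD_eq_getElem P "" hk]
      exact hlb
    rw [List.append_nil, pvRes, hng]
    cases hnd : decide P.Nodup <;> rfl
  | cons x rest' ih =>
    intro P hprev
    have hfull : P ++ x :: rest' = (P ++ [x]) ++ rest' := by simp
    have hlenfull : P.length < (P ++ x :: rest').length := by simp
    have hgetx : (P ++ x :: rest')[P.length]'hlenfull = x := by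
      rw [List.getElem_append_right (le_refl P.length)]
      simp
    cases hgl : (pvDA P).get? x with
    | some prev =>
      have hocc : (pvOccE 0 P x).getLast? = some prev := by rw [← pvDA_get?]; exact hgl
      have hsmax := sorted_getLast?_max (pvOccE_sorted 0 P x) hocc
      obtain ⟨k', hk', hpk', hlk'⟩ := pvOccE_mem.mp hsmax.1
      have hxP : x ∈ P := by rw [← hlk']; exact List.getElem_mem hk'
      have hprevm : prev ∈ pvOccE 0 (P ++ x :: rest') x := by
        rw [pvOccE_append]; exact List.mem_append_left _ hsmax.1
      by_cases hgap : 1 < (P.length : Int) - prev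
      · rw [show pvLoopB' (x :: rest') (P.length : Int) (pvDA P) (!decide P.Nodup) = "intervening" by
          simp [pvLoopB', hgl, hgap]]
        have hP : pvGapP (P ++ x :: rest') := by
          refine ⟨P.length, hlenfull, prev, ?_, hgap⟩
          rw [hgetx]
          refine ⟨hprevm, by omega, ?_⟩
          intro j hj hjlt
          rw [pvOccE_append] at hj
          rcases List.mem_append.mp hj with hj1 | hj1
          · exact hsmax.2 j hj1
          · obtain ⟨k2, hk2, rfl, -⟩ := pvOccE_mem.mp hj1
            omega
        rw [pvRes, (pvGapB_iff _).mpr hP]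
        rfl
      · rw [show pvLoopB' (x :: rest') (P.length : Int) (pvDA P) (!decide P.Nodup)
            = pvLoopB' rest' ((P.length : Int) + 1) ((pvDA P).insert x (P.length : Int)) true by
          simp [pvLoopB', hgl, hgap]]
        have hnd : ¬ (P ++ [x]).Nodup := by
          rw [List.nodup_append]
          rintro ⟨-, -, hdisj⟩
          exact hdisj x hxP x (List.mem_singleton_self x) rfl
        have hprev' : ∀ k, ∀ _ : k < (P ++ [x]).length, ∀ p,
            pvIsLastBefore ((P ++ [x]) ++ rest') (((P ++ [x]) ++ rest').getD k "") k p → ¬ 1 < (k : Int) - p := by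
          intro k hk p hlb
          rw [← hfull] at hlb
          simp only [List.length_append, List.length_cons, List.length_nil] at hk
          rcases Nat.lt_or_ge k P.length with hklt | hkge
          · exact hprev k hklt p hlb
          · have hkeq : k = P.length := by omega
            subst hkeq
            rw [List.getD_eq_getElem _ "" hlenfull, hgetx] at hlb
            obtain ⟨hpm, hplt, hpmax⟩ := hlb
            have hge := hpmax prev hprevm (by omega)
            omega
        have hrec := ih (P ++ [x]) hprev'
        rw [← hfull, pvDA_snoc] at hrec
        rw [show (!decide (P ++ [x]).Nodup) = true by simp [hnd]] at hrec
        rw [show (((P ++ [x]).length : Nat) : Int) = (P.length : Int) + 1 by simp] at hrec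
        exact hrec
    | none =>
      have hocc : pvOccE 0 P x = [] := by
        rw [← List.getLast?_eq_none_iff, ← pvDA_get?]; exact hgl
      have hxP : x ∉ P := (pvOccE_nil_iff P x).mp hocc
      rw [show pvLoopB' (x :: rest') (P.length : Int) (pvDA P) (!decide P.Nodup)
          = pvLoopB' rest' ((P.length : Int) + 1) ((pvDA P).insert x (P.length : Int)) (!decide P.Nodup) by
        simp [pvLoopB', hgl]]
      have hndeq : (P ++ [x]).Nodup ↔ P.Nodup := by
        rw [List.nodup_append]
        constructor
        · rintro ⟨h1, -, -⟩; exact h1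
        · intro h1
          refine ⟨h1, List.nodup_singleton x, ?_⟩
          intro a ha b hb
          rw [List.mem_singleton.mp hb]
          rintro rfl
          exact hxP ha
      have hprev' : ∀ k, ∀ _ : k < (P ++ [x]).length, ∀ p,
          pvIsLastBefore ((P ++ [x]) ++ rest') (((P ++ [x]) ++ rest').getD k "") k p → ¬ 1 < (k : Int) - p := by
        intro k hk p hlb
        rw [← hfull] at hlb
        simp only [List.length_append, List.length_cons, List.length_nil] at hk
        rcases Nat.lt_or_ge k P.length with hklt | hkge
        · exact hprev k hklt p hlb
        · have hkeq : k = P.length := by omega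
          subst hkeq
          rw [List.getD_eq_getElem _ "" hlenfull, hgetx] at hlb
          obtain ⟨hpm, hplt, -⟩ := hlb
          rw [pvOccE_append] at hpm
          rcases List.mem_append.mp hpm with hp1 | hp1
          · rw [hocc] at hp1; exact absurd hp1 (List.not_mem_nil)
          · obtain ⟨k2, hk2, rfl, -⟩ := pvOccE_mem.mp hp1
            omega
      have hrec := ih (P ++ [x]) hprev'
      rw [← hfull, pvDA_snoc] at hrec
      rw [show (!decide (P ++ [x]).Nodup) = (!decide P.Nodup) by
        rw [decide_eq_decide.mpr hndeq]] at hrec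
      rw [show (((P ++ [x]).length : Nat) : Int) = (P.length : Int) + 1 by simp] at hrec
      exact hrec

lemma B_eq_pvRes (trimmed : List (Int × String)) :
    classify_within_branch_repetition_alt trimmed =
      pvRes ((trimmed.map (fun p => p.2)).filter (fun l => !(l == ""))) := by
  rw [show classify_within_branch_repetition_alt trimmed
      = pvLoopB trimmed 0 PySem.Dict.empty false from rfl, pvLoopB_filter]
  have h := pvLoopB'_main ((trimmed.map (fun p => p.2)).filter (fun l => !(l == ""))) []
    (by intro k hk p hlb; simp at hk)
  simpa using h

-- ===== VERDICT (by name: the statement is the Claim_ definition above) =====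
theorem classify_within_branch_repetition_spec : Claim_equal_classify_within_branch_repetition := by
  intro trimmed _
  unfold Spec_classify_within_branch_repetition
  rw [A_eq_pvRes, B_eq_pvRes]
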